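-- pv_equiv track=rewrite | github.com/statisticsnorway/ssb-eimerdb | src/eimerdb/query.py | filter_partitions
-- ===== SOURCE A (Python) =====
-- from typing import Any
--
-- def filter_partitions(
--     table_files: list[str],
--     partition_select: dict[str, Any],
-- ) -> list[str]:
--     """Filter the list of partitioned files based on specified partition selection criteria.
--
--     Args:
--         table_files (list[str]): List of file paths corresponding to partitioned files.
--         partition_select (dict[str, Any]): Dictionary specifying partition selection criteria,
--             where keys are partition column names and values are lists of values to match.
--
--     Returns:
--         list[str]: A filtered list of file paths that match the specified partition selection criteria.
--
--     """
--     filtered_files = []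
--
--     for file in table_files:
--         parts = file.split("/")
--         all_matches = True
--
--         for key, values in partition_select.items():
--             match_found = any(f"{key}={value}" in parts for value in values)
--
--             if not match_found:
--                 all_matches = False
--                 break
--
--         if all_matches:
--             filtered_files.append(file)
--
--     return filtered_files
-- ===== SOURCE B (Python) =====
-- def filter_partitions(table_files, partition_select):
--     # Key-outer staged filtering: split every file once, then each partition key
--     # prunes the surviving candidates in turn via set intersection.
--     survivors = [(f, set(f.split("/"))) for f in table_files]
--     for key, values in partition_select.items():
--         wanted = {f"{key}={value}" for value in values}
--         survivors = [(f, parts) for f, parts in survivors if parts & wanted]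
--     return [f for f, _ in survivors]
-- ===== Notes on version B (the rewrite author's own statement) =====
-- stated objective: alternative
-- what changed: B inverts the loop nesting: instead of A's file-outer loop that re-checks every key per file, B splits each path once, then loops key-outer, each key pruning the surviving candidate list by set intersection with its precomputed 'key=value' set.
import Mathlib
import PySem

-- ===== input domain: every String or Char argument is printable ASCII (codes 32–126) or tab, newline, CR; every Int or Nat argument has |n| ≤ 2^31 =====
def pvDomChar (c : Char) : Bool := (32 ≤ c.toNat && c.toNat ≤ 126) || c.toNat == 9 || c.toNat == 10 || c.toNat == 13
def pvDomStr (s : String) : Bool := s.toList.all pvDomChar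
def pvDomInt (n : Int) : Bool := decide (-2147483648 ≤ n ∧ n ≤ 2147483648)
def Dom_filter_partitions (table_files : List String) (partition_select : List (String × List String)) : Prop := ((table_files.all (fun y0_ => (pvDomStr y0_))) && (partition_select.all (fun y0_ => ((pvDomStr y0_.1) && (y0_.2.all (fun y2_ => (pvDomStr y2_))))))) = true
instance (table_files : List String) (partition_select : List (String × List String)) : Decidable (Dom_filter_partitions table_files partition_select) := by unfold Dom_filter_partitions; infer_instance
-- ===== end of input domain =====

-- B inverts the loop nesting: each path is split once, then the loop runs key-outer,
-- each partition key pruning the surviving candidates by set intersection (objective: alternative).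

-- ===== PORT A =====
-- inner loop of A over partition_select.items(): all_matches with early break
def pvMatchA (parts : List String) : List (String × List String) → Bool
  | [] => true
  | (key, values) :: rest =>
    if values.any (fun value => parts.contains (key ++ "=" ++ value)) then
      pvMatchA parts rest
    else false

-- the dict parameter is read through Dict.ofList (insertion order, overwrite), then
-- iterated as .items(); file.split("/") with the non-empty literal "/" never raises,
-- so .getD [] is exact.
def filter_partitions (table_files : List String) (partition_select : List (String × List String)) : List String :=
  let items := (PySem.Dict.ofList partition_select).items
  table_files.foldl (fun filtered_files file =>
    let parts := (PySem.Str.split? file "/").getD []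
    if pvMatchA parts items then filtered_files ++ [file] else filtered_files) []

-- ===== PORT B =====
-- 'parts & wanted' is truthy iff the intersection set is non-empty
def filter_partitions_alt (table_files : List String) (partition_select : List (String × List String)) : List String :=
  let init := table_files.map (fun f =>
    (f, PySem.Set.ofList ((PySem.Str.split? f "/").getD [])))
  let survivors := (PySem.Dict.ofList partition_select).items.foldl
    (fun surv kv =>
      let wanted := PySem.Set.ofList (kv.2.map (fun value => kv.1 ++ "=" ++ value))
      surv.filter (fun fp => !(PySem.Set.inter fp.2 wanted).isEmpty))
    init
  survivors.map Prod.fst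

-- ===== PRECONDITION & SPEC =====
def Spec_filter_partitions (table_files : List String) (partition_select : List (String × List String)) (out : List String) : Prop := out = filter_partitions_alt table_files partition_select
instance (table_files : List String) (partition_select : List (String × List String)) (out : List String) : Decidable (Spec_filter_partitions table_files partition_select out) := by unfold Spec_filter_partitions; infer_instance

-- ===== CLAIM (what is proved, stated in full; the proofs are below) =====
def Claim_equal_filter_partitions : Prop := ∀ (table_files : List String) (partition_select : List (String × List String)), Dom_filter_partitions table_files partition_select → Spec_filter_partitions table_files partition_select (filter_partitions table_files partition_select)

-- ===== LEMMAS AND PROOFS =====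

-- folding staged filters over the keys = one filter by the conjunction over all keys
theorem pv_foldl_filter {α β : Type} (q : β → α → Bool) :
    ∀ (items : List β) (L : List α),
      items.foldl (fun surv kv => surv.filter (q kv)) L
        = L.filter (fun x => items.all (fun kv => q kv x)) := by
  intro items
  induction items with
  | nil => intro L; simp
  | cons kv rest ih =>
    intro L
    simp only [List.foldl_cons, ih, List.filter_filter, List.all_cons]
    exact List.filter_congr (fun x _ => by rw [Bool.and_comm])

-- one key: A's any-over-values membership test = B's intersection non-emptiness
theorem pv_key_eq (parts : List String) (k : String) (vs : List String) :
    vs.any (fun value => parts.contains (k ++ "=" ++ value))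
      = !(PySem.Set.inter (PySem.Set.ofList parts)
          (PySem.Set.ofList (vs.map (fun value => k ++ "=" ++ value)))).isEmpty := by
  rw [Bool.eq_iff_iff]
  simp only [List.any_eq_true, Bool.not_eq_true', List.isEmpty_eq_false_iff_exists_mem,
    PySem.Set.mem_inter, PySem.Set.mem_ofList, List.mem_map, List.contains_iff_mem]
  constructor
  · rintro ⟨v, hv, hc⟩
    exact ⟨k ++ "=" ++ v, hc, v, hv, rfl⟩
  · rintro ⟨x, hxp, v, hv, rfl⟩
    exact ⟨v, hv, hxp⟩

-- per file: A's early-break key loop agrees with B's per-key intersection test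
theorem pv_match_eq (parts : List String) (items : List (String × List String)) :
    pvMatchA parts items
      = items.all (fun kv =>
          !(PySem.Set.inter (PySem.Set.ofList parts)
              (PySem.Set.ofList (kv.2.map (fun value => kv.1 ++ "=" ++ value)))).isEmpty) := by
  induction items with
  | nil => rfl
  | cons kv rest ih =>
    obtain ⟨k, vs⟩ := kv
    simp only [pvMatchA, List.all_cons, ih, ← pv_key_eq]
    cases vs.any (fun value => parts.contains (k ++ "=" ++ value)) <;> simp

-- ===== VERDICT (by name: the statement is the Claim_ definition above) =====
theorem filter_partitions_spec : Claim_equal_filter_partitions := by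
  intro table_files partition_select _
  unfold Spec_filter_partitions
  simp only [filter_partitions, filter_partitions_alt]
  rw [PySem.List.foldl_append_if
    (p := fun file => pvMatchA ((PySem.Str.split? file "/").getD [])
            (PySem.Dict.ofList partition_select).items) (f := fun x => x)]
  rw [pv_foldl_filter, List.filter_map, List.map_map]
  simp only [Function.comp_def, List.map_id', List.nil_append]
  exact List.filter_congr (fun f _ => by rw [pv_match_eq])
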